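-- pv_equiv track=rewrite | github.com/EliteCoder2103/university-attendance | university_attendance_dp_solution.py | calculate_ways_and_probability
-- ===== SOURCE A (Python) =====
-- def calculate_ways_and_probability(N):
--     if N <= 0:
--         return "0/1"  # Edge case: no days to attend
--
--     dp_present = [0] * (N + 1)
--     dp_absent = [0] * (N + 1)
--
--     # Base case
--     dp_present[0] = 1
--     dp_absent[0] = 1
--
--     for i in range(1, N + 1):
--         dp_present[i] = dp_present[i - 1] + dp_absent[i - 1]
--         if i >= 4:
--             dp_absent[i] = dp_present[i - 1]
--         else:
--             dp_absent[i] = 0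
--
--     total_ways = dp_present[N] + dp_absent[N]
--     miss_probability = dp_absent[N]
--
--     return f"{miss_probability}/{total_ways}"
-- ===== SOURCE B (Python) =====
-- def _fib_pair(n):
--     # fast doubling: returns (F(n), F(n+1))
--     if n == 0:
--         return (0, 1)
--     a, b = _fib_pair(n // 2)
--     c = a * (2 * b - a)
--     d = a * a + b * b
--     return (d, c + d) if n % 2 else (c, d)
--
-- def calculate_ways_and_probability(N):
--     if N <= 0:
--         return "0/1"
--     if N <= 3:
--         return "0/2"
--     a, b = _fib_pair(N - 3)
--     return f"{2*a}/{2*(a+b)}"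
-- ===== Notes on version B (the rewrite author's own statement) =====
-- stated objective: faster
-- what changed: Replaced the O(N)-iteration DP over two length-(N+1) arrays by the closed-form Fibonacci characterisation of the answer, computed with the fast-doubling recursion in logarithmically many arithmetic steps.
import Mathlib
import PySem

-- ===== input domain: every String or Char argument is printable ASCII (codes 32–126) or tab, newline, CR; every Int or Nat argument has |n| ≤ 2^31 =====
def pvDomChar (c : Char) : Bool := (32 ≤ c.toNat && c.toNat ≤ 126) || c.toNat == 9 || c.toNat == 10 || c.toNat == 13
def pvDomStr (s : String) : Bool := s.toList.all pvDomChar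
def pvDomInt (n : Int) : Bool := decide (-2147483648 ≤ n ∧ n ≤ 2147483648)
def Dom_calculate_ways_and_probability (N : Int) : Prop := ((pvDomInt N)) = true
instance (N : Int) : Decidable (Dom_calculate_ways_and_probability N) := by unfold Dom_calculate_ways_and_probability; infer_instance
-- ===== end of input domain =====

-- B replaces A's O(N)-iteration DP over two length-(N+1) arrays by the closed-form
-- Fibonacci characterisation computed with fast doubling: objective = faster (asymptotic).

-- ===== PORT A =====
-- the for-loop of A as structural recursion on the remaining iteration count;
-- Python's in-range list indexing dp[j] is ported as .getD j 0 (all indices used are in range)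
def pvALoop : Nat → Nat → List Int → List Int → List Int × List Int
  | 0, _, p, a => (p, a)
  | n+1, i, p, a =>
      let p' := p.set i (p.getD (i-1) 0 + a.getD (i-1) 0)
      let a' := if 4 ≤ i then a.set i (p'.getD (i-1) 0) else a.set i 0
      pvALoop n (i+1) p' a'

def calculate_ways_and_probability (N : Int) : String :=
  if N ≤ 0 then "0/1"   -- Edge case: no days to attend
  else
    let dp_present := (List.replicate (N+1).toNat (0:Int)).set 0 1
    let dp_absent := (List.replicate (N+1).toNat (0:Int)).set 0 1
    let r := pvALoop N.toNat 1 dp_present dp_absent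
    let total_ways := r.1.getD N.toNat 0 + r.2.getD N.toNat 0
    let miss_probability := r.2.getD N.toNat 0
    PySem.Int.toStr miss_probability ++ "/" ++ PySem.Int.toStr total_ways

-- ===== PORT B =====
-- fast doubling: returns (F(n), F(n+1))
def pvFibPair : Nat → Int × Int
  | 0 => (0, 1)
  | n+1 =>
      let ab := pvFibPair ((n+1)/2)
      let c := ab.1 * (2 * ab.2 - ab.1)
      let d := ab.1 * ab.1 + ab.2 * ab.2
      if (n+1) % 2 = 1 then (d, c + d) else (c, d)
termination_by n => n
decreasing_by omega

def calculate_ways_and_probability_alt (N : Int) : String :=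
  if N ≤ 0 then "0/1"
  else if N ≤ 3 then "0/2"
  else
    let ab := pvFibPair (N - 3).toNat
    PySem.Int.toStr (2 * ab.1) ++ "/" ++ PySem.Int.toStr (2 * (ab.1 + ab.2))

-- ===== PRECONDITION & SPEC =====
def Spec_calculate_ways_and_probability (N : Int) (out : String) : Prop := out = calculate_ways_and_probability_alt N
instance (N : Int) (out : String) : Decidable (Spec_calculate_ways_and_probability N out) := by unfold Spec_calculate_ways_and_probability; infer_instance

-- ===== CLAIM (what is proved, stated in full; the proofs are below) =====
def Claim_equal_calculate_ways_and_probability : Prop := ∀ (N : Int), Dom_calculate_ways_and_probability N → Spec_calculate_ways_and_probability N (calculate_ways_and_probability N)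

-- ===== LEMMAS AND PROOFS =====

def fibI (n : Nat) : Int := (Nat.fib n : Int)

theorem fibI_add_two (n : Nat) : fibI (n+2) = fibI n + fibI (n+1) := by
  simp [fibI, Nat.fib_add_two]

theorem pvFibPair_eq (n : Nat) : pvFibPair n = (fibI n, fibI (n+1)) := by
  induction n using Nat.strong_induction_on with
  | _ n ih =>
    match n with
    | 0 => simp [pvFibPair, fibI]
    | Nat.succ m =>
      rw [pvFibPair]
      have h := ih ((m+1)/2) (by omega)
      rw [h]
      have hle : Nat.fib ((m+1)/2) ≤ 2 * Nat.fib ((m+1)/2 + 1) := by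
        have := @Nat.fib_le_fib_succ ((m+1)/2)
        omega
      rcases Nat.even_or_odd (m+1) with ⟨k, hk⟩ | ⟨k, hk⟩
      · have hdiv : (m+1)/2 = k := by omega
        have hmod : ¬ ((m+1) % 2 = 1) := by omega
        have h2k : m + 1 = 2 * k := by omega
        simp only [hdiv, hmod, if_false]
        have hc : fibI k * (2 * fibI (k+1) - fibI k) = fibI (m+1) := by
          rw [h2k]
          simp only [fibI]
          rw [Nat.fib_two_mul]
          have hk' : Nat.fib k ≤ 2 * Nat.fib (k + 1) := by rw [hdiv] at hle; exact hle
          push_cast [hk']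
          ring
        have hd : fibI k * fibI k + fibI (k+1) * fibI (k+1) = fibI (m+1+1) := by
          have : m + 1 + 1 = 2 * k + 1 := by omega
          rw [this]
          simp only [fibI]
          rw [Nat.fib_two_mul_add_one]
          push_cast
          ring
        rw [hc, hd]
      · have hdiv : (m+1)/2 = k := by omega
        have hmod : (m+1) % 2 = 1 := by omega
        have h2k : m + 1 = 2 * k + 1 := by omega
        simp only [hdiv, hmod, if_true]
        have hd : fibI k * fibI k + fibI (k+1) * fibI (k+1) = fibI (m+1) := by
          rw [h2k]
          simp only [fibI]
          rw [Nat.fib_two_mul_add_one]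
          push_cast
          ring
        have hc : fibI k * (2 * fibI (k+1) - fibI k) = fibI (2*k) := by
          simp only [fibI]
          rw [Nat.fib_two_mul]
          have hk' : Nat.fib k ≤ 2 * Nat.fib (k + 1) := by rw [hdiv] at hle; exact hle
          push_cast [hk']
          ring
        have hsum : fibI (2*k) + fibI (m+1) = fibI (m+1+1) := by
          have h1 : m + 1 + 1 = 2*k + 2 := by omega
          rw [h1, fibI_add_two, h2k]
        rw [hd, hc]
        rw [Prod.mk.injEq]
        exact ⟨rfl, hsum⟩

-- the mathematical content of A's two dp arrays at each index
def PQ : Nat → Int × Int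
  | 0 => (1, 1)
  | n+1 => ((PQ n).1 + (PQ n).2, if 4 ≤ n+1 then (PQ n).1 else 0)

theorem getD_set_ne (l : List Int) (i j : Nat) (v : Int) (h : i ≠ j) :
    (l.set i v).getD j 0 = l.getD j 0 := by
  simp [List.getD_eq_getElem?_getD, List.getElem?_set_ne h]

theorem getD_set_self (l : List Int) (i : Nat) (v : Int) (h : i < l.length) :
    (l.set i v).getD i 0 = v := by
  simp [List.getD_eq_getElem?_getD, List.getElem?_set_self h]

theorem pvALoop_inv : ∀ (n i : Nat) (p a : List Int), 1 ≤ i → i + n ≤ p.length → p.length = a.length →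
    (∀ j, j < i → p.getD j 0 = (PQ j).1 ∧ a.getD j 0 = (PQ j).2) →
    (pvALoop n i p a).1.length = p.length ∧ (pvALoop n i p a).2.length = a.length ∧
      ∀ j, j < i + n → (pvALoop n i p a).1.getD j 0 = (PQ j).1 ∧ (pvALoop n i p a).2.getD j 0 = (PQ j).2 := by
  intro n
  induction n with
  | zero => intro i p a h1 h2 h3 h4; exact ⟨rfl, rfl, h4⟩
  | succ n ih =>
    intro i p a h1 h2 h3 h4
    obtain ⟨m, rfl⟩ : ∃ m, i = m + 1 := ⟨i - 1, by omega⟩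
    simp only [pvALoop, Nat.add_sub_cancel]
    set p' := p.set (m+1) (p.getD m 0 + a.getD m 0) with hp'
    have hp'len : p'.length = p.length := by simp [hp']
    have hmem : m + 1 < p.length := by omega
    have hPQm := h4 m (by omega)
    have hp'i : p'.getD (m+1) 0 = (PQ (m+1)).1 := by
      rw [hp', getD_set_self _ _ _ hmem]
      show _ = (PQ m).1 + (PQ m).2
      rw [hPQm.1, hPQm.2]
    have hp'm : p'.getD m 0 = p.getD m 0 := getD_set_ne _ _ _ _ (by omega)
    set a' := if 4 ≤ m+1 then a.set (m+1) (p'.getD m 0) else a.set (m+1) 0 with ha'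
    have ha'eq : a' = a.set (m+1) (if 4 ≤ m+1 then p'.getD m 0 else 0) := by
      rw [ha']; split <;> rfl
    have ha'len : a'.length = a.length := by rw [ha'eq]; simp
    have ha'i : a'.getD (m+1) 0 = (PQ (m+1)).2 := by
      rw [ha'eq, getD_set_self _ _ _ (by omega)]
      show _ = if 4 ≤ m+1 then (PQ m).1 else 0
      rw [hp'm, hPQm.1]
    have hstep : ∀ j, j < (m+1) + 1 → p'.getD j 0 = (PQ j).1 ∧ a'.getD j 0 = (PQ j).2 := by
      intro j hj
      by_cases hji : j = m + 1
      · subst hji; exact ⟨hp'i, ha'i⟩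
      · have hjlt : j < m + 1 := by omega
        have := h4 j hjlt
        constructor
        · rw [hp', getD_set_ne _ _ _ _ (by omega)]; exact this.1
        · rw [ha'eq, getD_set_ne _ _ _ _ (by omega)]; exact this.2
    have := ih ((m+1)+1) p' a' (by omega) (by omega) (by rw [hp'len, ha'len]; exact h3) hstep
    refine ⟨by rw [this.1, hp'len], by rw [this.2.1, ha'len], ?_⟩
    intro j hj
    exact this.2.2 j (by omega)

theorem PQ_fib (k : Nat) : PQ (k+4) = (2 * fibI (k+2), 2 * fibI (k+1)) := by
  induction k with
  | zero => decide
  | succ m ih =>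
    show PQ (m+4+1) = _
    rw [PQ, ih, if_pos (by omega : 4 ≤ m+4+1)]
    rw [Prod.mk.injEq]
    constructor
    · show 2 * fibI (m+2) + 2 * fibI (m+1) = 2 * fibI (m+1+2)
      rw [fibI_add_two (m+1)]; ring
    · rfl

-- A's loop result at index N, for N ≥ 1
theorem A_loop_values (m : Nat) :
    (pvALoop m 1 ((List.replicate (m+1) (0:Int)).set 0 1) ((List.replicate (m+1) (0:Int)).set 0 1)).1.getD m 0 = (PQ m).1 ∧
    (pvALoop m 1 ((List.replicate (m+1) (0:Int)).set 0 1) ((List.replicate (m+1) (0:Int)).set 0 1)).2.getD m 0 = (PQ m).2 := by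
  have hlen : ((List.replicate (m+1) (0:Int)).set 0 1).length = m + 1 := by simp
  have hbase : ∀ j, j < 1 → ((List.replicate (m+1) (0:Int)).set 0 1).getD j 0 = (PQ j).1 ∧
      ((List.replicate (m+1) (0:Int)).set 0 1).getD j 0 = (PQ j).2 := by
    intro j hj
    have hj0 : j = 0 := by omega
    subst hj0
    have : ((List.replicate (m+1) (0:Int)).set 0 1).getD 0 0 = 1 := by
      apply getD_set_self
      simp
    rw [this]
    exact ⟨rfl, rfl⟩
  have := pvALoop_inv m 1 _ _ (le_refl 1) (by rw [hlen]; omega) rfl hbase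
  exact this.2.2 m (by omega)

theorem PQ_small : PQ 1 = (2, 0) ∧ PQ 2 = (2, 0) ∧ PQ 3 = (2, 0) := by decide

-- ===== VERDICT (by name: the statement is the Claim_ definition above) =====
theorem calculate_ways_and_probability_spec : Claim_equal_calculate_ways_and_probability := by
  unfold Claim_equal_calculate_ways_and_probability
  intro N _
  unfold Spec_calculate_ways_and_probability
  unfold calculate_ways_and_probability calculate_ways_and_probability_alt
  by_cases h0 : N ≤ 0
  · simp [h0]
  · simp only [if_neg h0]
    have hm1 : 1 ≤ N.toNat := by omega
    have hNat : (N+1).toNat = N.toNat + 1 := by omega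
    rw [hNat]
    have hA := A_loop_values N.toNat
    by_cases h3 : N ≤ 3
    · simp only [if_pos h3]
      have : N.toNat = 1 ∨ N.toNat = 2 ∨ N.toNat = 3 := by omega
      rcases this with h | h | h <;>
        rw [h] <;> rw [h] at hA <;>
        simp only [PQ_small.1, PQ_small.2.1, PQ_small.2.2] at hA <;>
        rw [hA.1, hA.2] <;> rfl
    · simp only [if_neg h3]
      obtain ⟨k, hk⟩ : ∃ k, N.toNat = k + 4 := ⟨N.toNat - 4, by omega⟩
      have hN3 : (N - 3).toNat = k + 1 := by omega
      rw [hN3, pvFibPair_eq, hk]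
      rw [hk, PQ_fib k] at hA
      simp only at hA ⊢
      rw [hA.1, hA.2]
      have htot : 2 * fibI (k+2) + 2 * fibI (k+1) = 2 * (fibI (k+1) + fibI (k+1+1)) := by ring
      rw [htot]
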